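-- pv_equiv track=rewrite | github.com/rsarwas/aoc | 2023-22/answers.py | find_new_min_z
-- ===== SOURCE A (Python) =====
-- def find_new_min_z(brick, min_zs):
--     """Find the lowest z value that this brick can have.
--     The floor is at z == 0, so the default lowest Z is 1"""
--     (x1, y1, _), (x2, y2, _) = brick
--     z = 0
--     if x1 < x2:  # y1 == y2, z1 == z2
--         for x in range(x1, x2 + 1):
--             if (x, y1) in min_zs and min_zs[(x, y1)] > z:
--                 z = min_zs[(x, y1)]
--     elif y1 < y2:  #  x1 == x2, z1 == z2
--         for y in range(y1, y2 + 1):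
--             if (x1, y) in min_zs and min_zs[(x1, y)] > z:
--                 z = min_zs[(x1, y)]
--     else:  #  z1 < z2 and x1 == x2 and y1 == y2
--         if (x1, y1) in min_zs:
--             z = min_zs[(x1, y1)]
--     return z + 1
-- ===== SOURCE B (Python) =====
-- def find_new_min_z(brick, min_zs):
--     """Find the lowest z value that this brick can have.
--     Single pass over the height map: keep the tallest recorded column whose
--     cell lies under the brick's footprint (instead of probing every footprint
--     cell of the coordinate range)."""
--     (x1, y1, _), (x2, y2, _) = brick
--     if not x1 < x2 and not y1 < y2:
--         return min_zs.get((x1, y1), 0) + 1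
--     if x1 < x2:
--         hit = lambda x, y: y == y1 and x1 <= x <= x2
--     else:
--         hit = lambda x, y: x == x1 and y1 <= y <= y2
--     best = 0
--     for (x, y), v in min_zs.items():
--         if hit(x, y) and v > best:
--             best = v
--     return best + 1
-- ===== Notes on version B (the rewrite author's own statement) =====
-- stated objective: faster
-- what changed: B replaces A's per-footprint-cell dict probing (a loop over the coordinate range with a membership test and lookup per cell) by one pass over the stored height map, filtering each entry against the footprint segment and keeping the running max; the single-cell case becomes a plain .get.
import Mathlib
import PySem

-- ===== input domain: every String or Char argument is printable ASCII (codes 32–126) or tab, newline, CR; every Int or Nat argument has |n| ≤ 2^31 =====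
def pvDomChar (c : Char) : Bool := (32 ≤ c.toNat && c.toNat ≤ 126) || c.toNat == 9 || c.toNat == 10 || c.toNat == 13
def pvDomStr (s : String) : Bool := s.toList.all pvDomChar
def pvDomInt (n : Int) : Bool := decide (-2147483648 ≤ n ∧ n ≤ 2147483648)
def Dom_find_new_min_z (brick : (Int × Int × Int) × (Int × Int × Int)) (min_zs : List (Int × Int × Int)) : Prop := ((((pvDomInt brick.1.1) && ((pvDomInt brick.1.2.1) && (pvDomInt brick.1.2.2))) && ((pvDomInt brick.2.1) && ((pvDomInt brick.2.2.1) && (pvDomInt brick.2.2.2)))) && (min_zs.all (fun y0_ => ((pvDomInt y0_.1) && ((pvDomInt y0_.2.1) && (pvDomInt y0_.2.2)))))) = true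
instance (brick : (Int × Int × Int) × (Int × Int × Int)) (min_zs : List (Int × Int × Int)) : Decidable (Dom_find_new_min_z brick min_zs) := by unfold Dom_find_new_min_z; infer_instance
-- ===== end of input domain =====

-- B scans the stored height map once instead of probing the dict for every footprint cell of the coordinate range; return values are proved equal on duplicate-key-free association lists.

-- ===== PORT A =====
-- dict[(x,y)] lookup on the flattened association list (first match); exact for '(x,y) in d' / 'd[(x,y)]' / 'd.get((x,y), 0)'
def pvLookup (l : List (Int × Int × Int)) (x y : Int) : Option Int :=
  match l with
  | [] => none
  | (a, b, v) :: t => if a = x ∧ b = y then some v else pvLookup t x y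

def find_new_min_z (brick : (Int × Int × Int) × (Int × Int × Int)) (min_zs : List (Int × Int × Int)) : Int :=
  let x1 := brick.1.1; let y1 := brick.1.2.1
  let x2 := brick.2.1; let y2 := brick.2.2.1
  let z : Int :=
    if x1 < x2 then
      (PySem.List.pyRange x1 (x2 + 1) 1).foldl (fun z x =>
        match pvLookup min_zs x y1 with
        | some v => if v > z then v else z
        | none => z) 0
    else if y1 < y2 then
      (PySem.List.pyRange y1 (y2 + 1) 1).foldl (fun z y =>
        match pvLookup min_zs x1 y with
        | some v => if v > z then v else z
        | none => z) 0
    else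
      match pvLookup min_zs x1 y1 with
      | some v => v
      | none => 0
  z + 1

-- ===== PORT B =====
def find_new_min_z_alt (brick : (Int × Int × Int) × (Int × Int × Int)) (min_zs : List (Int × Int × Int)) : Int :=
  let x1 := brick.1.1; let y1 := brick.1.2.1
  let x2 := brick.2.1; let y2 := brick.2.2.1
  if ¬ x1 < x2 ∧ ¬ y1 < y2 then
    (pvLookup min_zs x1 y1).getD 0 + 1
  else
    let hit : Int → Int → Bool :=
      if x1 < x2 then fun x y => y == y1 && decide (x1 ≤ x) && decide (x ≤ x2)
      else fun x y => x == x1 && decide (y1 ≤ y) && decide (y ≤ y2)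
    (min_zs.foldl (fun best e =>
      if hit e.1 e.2.1 && decide (e.2.2 > best) then e.2.2 else best) 0) + 1

-- ===== PRECONDITION & SPEC =====
-- Pre_ excludes association lists with duplicate (x,y) keys: they do not arise from a Python
-- dict (dict construction collapses duplicates), and on them A's first-match lookup versus
-- B's whole-list scan is an accident of the encoding.
def Pre_find_new_min_z (_brick : (Int × Int × Int) × (Int × Int × Int)) (min_zs : List (Int × Int × Int)) : Prop :=
  List.Pairwise (fun a b => ¬ (a.1 = b.1 ∧ a.2.1 = b.2.1)) min_zs
instance (_brick : (Int × Int × Int) × (Int × Int × Int)) (min_zs : List (Int × Int × Int)) : Decidable (Pre_find_new_min_z _brick min_zs) := by unfold Pre_find_new_min_z; infer_instance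

def pvWitness_find_new_min_z : ((Int × Int × Int) × (Int × Int × Int)) × (List (Int × Int × Int)) :=
  (((0, 0, 1), (2, 0, 1)), [(0, 0, 2), (1, 0, 3)])

def Spec_find_new_min_z (brick : (Int × Int × Int) × (Int × Int × Int)) (min_zs : List (Int × Int × Int)) (out : Int) : Prop := out = find_new_min_z_alt brick min_zs
instance (brick : (Int × Int × Int) × (Int × Int × Int)) (min_zs : List (Int × Int × Int)) (out : Int) : Decidable (Spec_find_new_min_z brick min_zs out) := by unfold Spec_find_new_min_z; infer_instance

-- ===== CLAIM (what is proved, stated in full; the proofs are below) =====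
def Claim_equal_find_new_min_z : Prop := ∀ (brick : (Int × Int × Int) × (Int × Int × Int)) (min_zs : List (Int × Int × Int)), Dom_find_new_min_z brick min_zs → Pre_find_new_min_z brick min_zs → Spec_find_new_min_z brick min_zs (find_new_min_z brick min_zs)

-- ===== LEMMAS AND PROOFS =====

-- A-side fold (running max of looked-up values over a list of coordinates)
def foldA (g : Int → Option Int) (l : List Int) (z : Int) : Int :=
  l.foldl (fun z x =>
    match g x with
    | some v => if v > z then v else z
    | none => z) z

-- B-side fold (running max of values of entries that hit the footprint)
def foldB (hit : Int → Int → Bool) (l : List (Int × Int × Int)) (best : Int) : Int :=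
  l.foldl (fun best e =>
    if hit e.1 e.2.1 && decide (e.2.2 > best) then e.2.2 else best) best

theorem foldA_ge (g : Int → Option Int) (l : List Int) (z : Int) : z ≤ foldA g l z := by
  induction l generalizing z with
  | nil => simp [foldA]
  | cons x t ih =>
    refine le_trans ?_ (ih _)
    cases hg : g x with
    | none => simp [hg]
    | some v => simp only [hg]; split <;> omega

theorem foldA_mem (g : Int → Option Int) (l : List Int) (z : Int) :
    foldA g l z = z ∨ ∃ x ∈ l, g x = some (foldA g l z) := by
  induction l generalizing z with
  | nil => left; simp [foldA]
  | cons x t ih =>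
    have step : foldA g (x :: t) z = foldA g t (match g x with
      | some v => if v > z then v else z | none => z) := rfl
    rcases ih (match g x with | some v => if v > z then v else z | none => z) with h | ⟨x', hx', hg'⟩
    · rw [step, h]
      cases hg : g x with
      | none => left; simp only [hg]
      | some v =>
        simp only [hg]
        split
        · right; exact ⟨x, List.mem_cons_self .., hg⟩
        · left; rfl
    · right; exact ⟨x', List.mem_cons_of_mem _ hx', by rw [step]; exact hg'⟩

theorem foldA_ub (g : Int → Option Int) (l : List Int) (z : Int) :
    ∀ x ∈ l, ∀ v, g x = some v → v ≤ foldA g l z := by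
  induction l generalizing z with
  | nil => intro x hx; simp at hx
  | cons y t ih =>
    intro x hx v hg
    have step : foldA g (y :: t) z = foldA g t (match g y with
      | some w => if w > z then w else z | none => z) := rfl
    rcases List.mem_cons.mp hx with rfl | hx'
    · rw [step, hg]
      refine le_trans ?_ (foldA_ge _ _ _)
      simp only; split <;> omega
    · rw [step]; exact ih _ x hx' v hg

theorem foldB_ge (hit : Int → Int → Bool) (l : List (Int × Int × Int)) (z : Int) :
    z ≤ foldB hit l z := by
  induction l generalizing z with
  | nil => simp [foldB]
  | cons e t ih =>
    have step : foldB hit (e :: t) z =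
        foldB hit t (if hit e.1 e.2.1 && decide (e.2.2 > z) then e.2.2 else z) := rfl
    rw [step]
    refine le_trans ?_ (ih _)
    split
    · next hc => have := of_decide_eq_true (Bool.and_elim_right hc); omega
    · omega

theorem foldB_mem (hit : Int → Int → Bool) (l : List (Int × Int × Int)) (z : Int) :
    foldB hit l z = z ∨ ∃ e ∈ l, hit e.1 e.2.1 = true ∧ e.2.2 = foldB hit l z := by
  induction l generalizing z with
  | nil => left; simp [foldB]
  | cons e t ih =>
    have step : foldB hit (e :: t) z =
        foldB hit t (if hit e.1 e.2.1 && decide (e.2.2 > z) then e.2.2 else z) := rfl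
    rcases ih (if hit e.1 e.2.1 && decide (e.2.2 > z) then e.2.2 else z) with h | ⟨e', he', hh', hv'⟩
    · rw [step, h]
      by_cases hc : (hit e.1 e.2.1 && decide (e.2.2 > z)) = true
      · right
        exact ⟨e, List.mem_cons_self .., Bool.and_elim_left hc, by simp [hc]⟩
      · left; simp [hc]
    · right; exact ⟨e', List.mem_cons_of_mem _ he', hh', by rw [step]; exact hv'⟩

theorem foldB_ub (hit : Int → Int → Bool) (l : List (Int × Int × Int)) (z : Int) :
    ∀ e ∈ l, hit e.1 e.2.1 = true → e.2.2 ≤ foldB hit l z := by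
  induction l generalizing z with
  | nil => intro e he; simp at he
  | cons f t ih =>
    intro e he hh
    have step : foldB hit (f :: t) z =
        foldB hit t (if hit f.1 f.2.1 && decide (f.2.2 > z) then f.2.2 else z) := rfl
    rcases List.mem_cons.mp he with rfl | he'
    · rw [step]
      have hw : e.2.2 ≤ (if hit e.1 e.2.1 && decide (e.2.2 > z) then e.2.2 else z) := by
        by_cases hgt : e.2.2 > z
        · simp [hh, hgt]
        · split <;> omega
      exact le_trans hw (foldB_ge _ _ _)
    · rw [step]; exact ih _ e he' hh

-- lookup characterisation
theorem pvLookup_some_mem (l : List (Int × Int × Int)) (x y v : Int)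
    (h : pvLookup l x y = some v) : (x, y, v) ∈ l := by
  induction l with
  | nil => simp [pvLookup] at h
  | cons e t ih =>
    obtain ⟨a, b, w⟩ := e
    by_cases hc : a = x ∧ b = y
    · simp [pvLookup, hc] at h
      obtain ⟨rfl, rfl⟩ := hc
      simp [h]
    · simp [pvLookup, hc] at h
      exact List.mem_cons_of_mem _ (ih h)

theorem pvLookup_of_mem_nodup (l : List (Int × Int × Int)) (x y v : Int)
    (hnd : List.Pairwise (fun a b => ¬ (a.1 = b.1 ∧ a.2.1 = b.2.1)) l)
    (hm : (x, y, v) ∈ l) : pvLookup l x y = some v := by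
  induction l with
  | nil => simp at hm
  | cons e t ih =>
    obtain ⟨a, b, w⟩ := e
    rcases List.mem_cons.mp hm with h | h
    · rw [Prod.mk.injEq, Prod.mk.injEq] at h
      obtain ⟨rfl, rfl, rfl⟩ := h
      simp [pvLookup]
    · have hne : ¬ (a = x ∧ b = y) := by
        have := (List.pairwise_cons.mp hnd).1 _ h
        simpa using this
      simp [pvLookup, hne]
      exact ih (List.pairwise_cons.mp hnd).2 h

-- the sandwich: on nodup-key lists the range-probing fold equals the map-scanning fold
theorem foldA_eq_foldB (l : List (Int × Int × Int)) (hit : Int → Int → Bool)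
    (cells : List Int) (gx gy : Int → Int)
    (hnd : List.Pairwise (fun a b => ¬ (a.1 = b.1 ∧ a.2.1 = b.2.1)) l)
    (hhit : ∀ x y : Int, hit x y = true ↔ ∃ c ∈ cells, gx c = x ∧ gy c = y) :
    foldA (fun c => pvLookup l (gx c) (gy c)) cells 0 = foldB hit l 0 := by
  have hA0 : (0 : Int) ≤ foldA (fun c => pvLookup l (gx c) (gy c)) cells 0 := foldA_ge _ _ _
  have hB0 : (0 : Int) ≤ foldB hit l 0 := foldB_ge _ _ _
  apply le_antisymm
  · rcases foldA_mem (fun c => pvLookup l (gx c) (gy c)) cells 0 with h | ⟨c, hc, hg⟩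
    · omega
    · have hm := pvLookup_some_mem _ _ _ _ hg
      have hhit' : hit (gx c) (gy c) = true := (hhit _ _).mpr ⟨c, hc, rfl, rfl⟩
      exact foldB_ub hit l 0 _ hm hhit'
  · rcases foldB_mem hit l 0 with h | ⟨e, he, hh, hv⟩
    · omega
    · obtain ⟨c, hc, hgx, hgy⟩ := (hhit _ _).mp hh
      have hm : (gx c, gy c, e.2.2) ∈ l := by rw [hgx, hgy]; simpa using he
      have hlk : pvLookup l (gx c) (gy c) = some e.2.2 :=
        pvLookup_of_mem_nodup _ _ _ _ hnd hm
      have := foldA_ub (fun c => pvLookup l (gx c) (gy c)) cells 0 c hc _ hlk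
      omega

-- ===== VERDICT (by name: the statement is the Claim_ definition above) =====
theorem find_new_min_z_spec : Claim_equal_find_new_min_z := by
  intro brick min_zs _hdom hpre
  obtain ⟨⟨x1, y1, z1⟩, ⟨x2, y2, z2⟩⟩ := brick
  unfold Spec_find_new_min_z find_new_min_z find_new_min_z_alt
  simp only
  by_cases h1 : x1 < x2
  · rw [if_pos h1, if_neg (by omega : ¬ (¬ x1 < x2 ∧ ¬ y1 < y2)), if_pos h1]
    have := foldA_eq_foldB min_zs
      (fun x y => y == y1 && decide (x1 ≤ x) && decide (x ≤ x2))
      (PySem.List.pyRange x1 (x2 + 1) 1) (fun c => c) (fun _ => y1) hpre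
      (by
        intro x y
        constructor
        · intro h
          simp at h
          exact ⟨x, by rw [PySem.List.mem_pyRange_one]; omega, rfl, h.1.1.symm⟩
        · rintro ⟨c, hc, rfl, rfl⟩
          rw [PySem.List.mem_pyRange_one] at hc
          simp; omega)
    simpa [foldA, foldB] using this
  · rw [if_neg h1]
    by_cases h2 : y1 < y2
    · rw [if_pos h2, if_neg (by omega : ¬ (¬ x1 < x2 ∧ ¬ y1 < y2)), if_neg h1]
      have := foldA_eq_foldB min_zs
        (fun x y => x == x1 && decide (y1 ≤ y) && decide (y ≤ y2))
        (PySem.List.pyRange y1 (y2 + 1) 1) (fun _ => x1) (fun c => c) hpre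
        (by
          intro x y
          constructor
          · intro h
            simp at h
            exact ⟨y, by rw [PySem.List.mem_pyRange_one]; omega, h.1.1.symm, rfl⟩
          · rintro ⟨c, hc, rfl, rfl⟩
            rw [PySem.List.mem_pyRange_one] at hc
            simp; omega)
      simpa [foldA, foldB] using this
    · rw [if_neg h2, if_pos ⟨h1, h2⟩]
      cases pvLookup min_zs x1 y1 <;> simp [Option.getD]
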